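-- pv_equiv track=rewrite | github.com/GeorgeZverev/CityDistance | src/user_interface.py | __remove_leading_number
-- ===== SOURCE A (Python) =====
-- def __remove_leading_number(city: str) -> str:
--     list_of_tokens = city.split(' ')
--     normalized_city = ''
--     for index, token in enumerate(list_of_tokens):
--         if index == 0:
--             continue
--         normalized_city = normalized_city + token + ' '
--     normalized_city = normalized_city.rstrip()
--     return normalized_city
-- ===== SOURCE B (Python) =====
-- def __remove_leading_number(city: str) -> str:
--     return city.partition(' ')[2].rstrip()
-- ===== Notes on version B (the rewrite author's own statement) =====
-- stated objective: idiomatic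
-- what changed: Replaces the split-into-tokens loop with repeated string concatenation by a single partition on the first space and one rstrip of the remainder.
import Mathlib
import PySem

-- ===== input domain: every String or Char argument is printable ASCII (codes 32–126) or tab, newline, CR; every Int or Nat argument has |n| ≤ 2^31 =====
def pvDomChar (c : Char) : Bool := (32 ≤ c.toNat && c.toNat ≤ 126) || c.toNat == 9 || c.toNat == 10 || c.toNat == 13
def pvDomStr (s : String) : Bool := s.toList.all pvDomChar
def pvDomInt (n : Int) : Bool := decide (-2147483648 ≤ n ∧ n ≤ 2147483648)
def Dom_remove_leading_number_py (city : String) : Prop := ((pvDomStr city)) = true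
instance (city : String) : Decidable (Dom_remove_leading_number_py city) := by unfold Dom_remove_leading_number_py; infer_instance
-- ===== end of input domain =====

-- B replaces A's token loop with a single partition-on-first-space plus rstrip (idiomatic).

-- ===== PORT A =====
def remove_leading_number_py (city : String) : String :=
  -- city.split(' '): sep is nonempty, so split? always returns some; splitOn is that value
  let list_of_tokens := PySem.Chars.splitOn city.toList [' ']
  -- for index, token in enumerate(...): skip index 0, else acc = acc + token + ' '
  let normalized_city :=
    (PySem.List.enumerate list_of_tokens).foldl
      (fun acc p => if p.1 == 0 then acc else acc ++ p.2 ++ [' ']) ([] : List Char)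
  String.ofList (PySem.Chars.rstrip normalized_city)

-- ===== PORT B =====
def remove_leading_number_py_alt (city : String) : String :=
  let cs := city.toList
  -- city.partition(' ')[2]: the part after the first space, '' if there is no space
  let i := PySem.Chars.find cs [' ']
  let after := if i = -1 then ([] : List Char) else PySem.Chars.slice cs (some (i + 1)) none
  String.ofList (PySem.Chars.rstrip after)

-- ===== PRECONDITION & SPEC =====
def Spec_remove_leading_number_py (city : String) (out : String) : Prop := out = remove_leading_number_py_alt city
instance (city : String) (out : String) : Decidable (Spec_remove_leading_number_py city out) := by unfold Spec_remove_leading_number_py; infer_instance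

-- ===== CLAIM (what is proved, stated in full; the proofs are below) =====
def Claim_equal_remove_leading_number_py : Prop := ∀ (city : String), Dom_remove_leading_number_py city → Spec_remove_leading_number_py city (remove_leading_number_py city)

-- ===== LEMMAS AND PROOFS =====

-- simple structural split on ' ' used as the common reference form of A's splitOn
def pvSplit : List Char → List (List Char)
  | [] => [[]]
  | c :: r => if c = ' ' then [] :: pvSplit r else (pvSplit r).modifyHead (c :: ·)

theorem pvSplit_ne_nil (cs : List Char) : pvSplit cs ≠ [] := by
  induction cs with
  | nil => simp [pvSplit]
  | cons c r ih =>
    simp only [pvSplit]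
    split_ifs
    · simp
    · cases h : pvSplit r with
      | nil => exact absurd h ih
      | cons a t => simp [List.modifyHead]

theorem go_eq_pvSplit (cs : List Char) : ∀ (fuel : Nat), cs.length ≤ fuel →
    ∀ (cur : List Char) (acc : List (List Char)),
    PySem.Chars.splitOn.go [' '] fuel cs cur acc
      = acc.reverse ++ (pvSplit cs).modifyHead (cur.reverse ++ ·) := by
  induction cs with
  | nil =>
    intro fuel _ cur acc
    cases fuel <;> simp [PySem.Chars.splitOn.go, pvSplit]
  | cons c r ih =>
    intro fuel hf cur acc
    cases fuel with
    | zero => simp at hf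
    | succ n =>
      simp only [List.length_cons] at hf
      by_cases hc : c = ' '
      · subst hc
        have hpre : [' '].isPrefixOf (' ' :: r) = true := by simp [List.isPrefixOf]
        simp only [PySem.Chars.splitOn.go, hpre, if_true, List.length_singleton, List.drop_one,
          List.tail_cons]
        rw [ih n (by omega) [] (cur.reverse :: acc)]
        cases hh : pvSplit r <;> simp [pvSplit, List.modifyHead, hh]
      · have hpre : [' '].isPrefixOf (c :: r) = false := by
          simp [List.isPrefixOf]
          exact fun e => hc e.symm
        simp only [PySem.Chars.splitOn.go, hpre]
        rw [ih n (by omega) (c :: cur) acc]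
        simp only [pvSplit, if_neg hc]
        obtain ⟨a, t, ht⟩ : ∃ a t, pvSplit r = a :: t := by
          cases h : pvSplit r with
          | nil => exact absurd h (pvSplit_ne_nil r)
          | cons a t => exact ⟨a, t, rfl⟩
        simp [ht, List.modifyHead]

theorem splitOn_eq_pvSplit (cs : List Char) :
    PySem.Chars.splitOn cs [' '] = pvSplit cs := by
  show PySem.Chars.splitOn.go [' '] (cs.length + 1) cs [] [] = _
  rw [go_eq_pvSplit cs (cs.length + 1) (by omega) [] []]
  obtain ⟨a, t, ht⟩ : ∃ a t, pvSplit cs = a :: t := by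
    cases h : pvSplit cs with
    | nil => exact absurd h (pvSplit_ne_nil cs)
    | cons a t => exact ⟨a, t, rfl⟩
  simp [ht, List.modifyHead]

-- K: joining ALL tokens of pvSplit with a trailing space reproduces the string plus one space
theorem flatten_pvSplit (cs : List Char) :
    ((pvSplit cs).map (· ++ [' '])).flatten = cs ++ [' '] := by
  induction cs with
  | nil => simp [pvSplit]
  | cons c r ih =>
    simp only [pvSplit]
    split_ifs with hc
    · subst hc; simp [ih]
    · obtain ⟨a, t, ht⟩ : ∃ a t, pvSplit r = a :: t := by
        cases h : pvSplit r with
        | nil => exact absurd h (pvSplit_ne_nil r)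
        | cons a t => exact ⟨a, t, rfl⟩
      simp only [ht, List.modifyHead, List.map_cons, List.flatten_cons]
      simp only [ht, List.map_cons, List.flatten_cons] at ih
      simp [← ih]

-- the tail tokens of a string with no space join to []
theorem tail_pvSplit_no_space (cs : List Char) (h : ' ' ∉ cs) :
    (pvSplit cs).tail = [] := by
  induction cs with
  | nil => simp [pvSplit]
  | cons c r ih =>
    simp only [List.mem_cons] at h
    push_neg at h
    have hcs : ¬ c = ' ' := fun e => h.1 e.symm
    simp only [pvSplit, if_neg hcs]
    obtain ⟨a, t, ht⟩ : ∃ a t, pvSplit r = a :: t := by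
      cases hh : pvSplit r with
      | nil => exact absurd hh (pvSplit_ne_nil r)
      | cons a t => exact ⟨a, t, rfl⟩
    have := ih h.2
    simp [ht, List.modifyHead] at this ⊢
    exact this

-- the tail tokens of t0 ++ ' ' :: rest (t0 spaceless) are exactly the tokens of rest
theorem tail_pvSplit_split (t0 rest : List Char) (h : ' ' ∉ t0) :
    (pvSplit (t0 ++ ' ' :: rest)).tail = pvSplit rest := by
  induction t0 with
  | nil => simp [pvSplit]
  | cons c t ih =>
    simp only [List.mem_cons] at h
    push_neg at h
    have hcs : ¬ c = ' ' := fun e => h.1 e.symm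
    simp only [List.cons_append, pvSplit, if_neg hcs]
    obtain ⟨a, s, hs⟩ : ∃ a s, pvSplit (t ++ ' ' :: rest) = a :: s := by
      cases hh : pvSplit (t ++ ' ' :: rest) with
      | nil => exact absurd hh (pvSplit_ne_nil _)
      | cons a s => exact ⟨a, s, rfl⟩
    have := ih h.2
    simp [hs, List.modifyHead] at this ⊢
    exact this

-- A's loop over enumerate: fold with positive start appends every token plus a space
theorem foldl_enumerate_pos (ts : List (List Char)) :
    ∀ (start : Int), 1 ≤ start → ∀ (acc : List Char),
    (PySem.List.enumerate ts start).foldl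
      (fun acc p => if p.1 == 0 then acc else acc ++ p.2 ++ [' ']) acc
      = acc ++ (ts.map (· ++ [' '])).flatten := by
  induction ts with
  | nil => intro start _ acc; simp [PySem.List.enumerate]
  | cons h t ih =>
    intro start hs acc
    have h0 : (start == 0) = false := by simp; omega
    simp only [PySem.List.enumerate, List.foldl_cons, h0, Bool.false_eq_true, if_false]
    rw [ih (start + 1) (by omega) (acc ++ h ++ [' '])]
    simp

-- A's whole accumulation equals the flatten of the tail tokens
theorem foldl_enumerate_eq (toks : List (List Char)) (hne : toks ≠ []) :
    (PySem.List.enumerate toks).foldl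
      (fun acc p => if p.1 == 0 then acc else acc ++ p.2 ++ [' ']) []
      = (toks.tail.map (· ++ [' '])).flatten := by
  cases toks with
  | nil => exact absurd rfl hne
  | cons h t =>
    show (PySem.List.enumerate (h :: t) 0).foldl _ [] = _
    simp only [PySem.List.enumerate, List.foldl_cons, BEq.rfl, if_true]
    rw [foldl_enumerate_pos t (0 + 1) (by omega) []]
    simp

-- rstrip swallows a trailing space
theorem rstrip_append_space (x : List Char) :
    PySem.Chars.rstrip (x ++ [' ']) = PySem.Chars.rstrip x := by
  simp [PySem.Chars.rstrip, show PySem.Chars.isspace ' ' = true from by decide]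

-- find.go on a spaceless list is -1
theorem find_go_no_space (cs : List Char) (h : ' ' ∉ cs) :
    ∀ (k : Nat), PySem.Chars.find.go [' '] cs k = -1 := by
  induction cs with
  | nil => intro k; simp [PySem.Chars.find.go, List.isEmpty]
  | cons c r ih =>
    intro k
    simp only [List.mem_cons] at h
    push_neg at h
    have hpre : [' '].isPrefixOf (c :: r) = false := by
      simp [List.isPrefixOf]
      exact h.1
    simp only [PySem.Chars.find.go, hpre]
    exact ih h.2 (k + 1)

-- find.go locates the first space at offset t0.length
theorem find_go_split (t0 rest : List Char) (h : ' ' ∉ t0) :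
    ∀ (k : Nat), PySem.Chars.find.go [' '] (t0 ++ ' ' :: rest) k = (k : Int) + t0.length := by
  induction t0 with
  | nil =>
    intro k
    have hpre : [' '].isPrefixOf (' ' :: rest) = true := by simp [List.isPrefixOf]
    simp [PySem.Chars.find.go, hpre]
  | cons c t ih =>
    intro k
    simp only [List.mem_cons] at h
    push_neg at h
    have hpre : [' '].isPrefixOf (c :: (t ++ ' ' :: rest)) = false := by
      simp [List.isPrefixOf]
      exact h.1
    simp only [List.cons_append, PySem.Chars.find.go, hpre]
    rw [ih h.2 (k + 1)]
    simp only [List.length_cons]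
    push_cast
    ring

-- decompose any list containing a space at its FIRST space
theorem exists_first_space (cs : List Char) (h : ' ' ∈ cs) :
    ∃ t0 rest, cs = t0 ++ ' ' :: rest ∧ ' ' ∉ t0 := by
  induction cs with
  | nil => simp at h
  | cons c r ih =>
    by_cases hc : c = ' '
    · exact ⟨[], r, by simp [hc], by simp⟩
    · have hr : ' ' ∈ r := by
        rcases List.mem_cons.mp h with h1 | h1
        · exact absurd h1.symm hc
        · exact h1
      obtain ⟨t0, rest, heq, hns⟩ := ih hr
      exact ⟨c :: t0, rest, by simp [heq], by
        simp only [List.mem_cons]; push_neg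
        exact ⟨fun hcc => hc hcc.symm, hns⟩⟩

-- ===== VERDICT (by name: the statement is the Claim_ definition above) =====
theorem remove_leading_number_py_spec : Claim_equal_remove_leading_number_py := by
  intro city _
  unfold Spec_remove_leading_number_py remove_leading_number_py remove_leading_number_py_alt
  simp only [splitOn_eq_pvSplit]
  rw [foldl_enumerate_eq _ (pvSplit_ne_nil _)]
  by_cases h : ' ' ∈ city.toList
  · obtain ⟨t0, rest, heq, hns⟩ := exists_first_space city.toList h
    rw [heq, tail_pvSplit_split t0 rest hns, flatten_pvSplit, rstrip_append_space]
    have hfind : PySem.Chars.find (t0 ++ ' ' :: rest) [' '] = (t0.length : Int) := by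
      show PySem.Chars.find.go [' '] (t0 ++ ' ' :: rest) 0 = _
      rw [find_go_split t0 rest hns 0]; simp
    rw [hfind]
    have hne : ((t0.length : Int)) ≠ -1 := by omega
    rw [if_neg hne]
    have : PySem.Chars.slice (t0 ++ ' ' :: rest) (some ((t0.length : Int) + 1)) none
        = rest := by
      simp only [PySem.Chars.slice_eq_listSlice]
      have : ((t0.length : Int) + 1) = ((t0.length + 1 : Nat) : Int) := by push_cast; ring
      rw [this, PySem.List.slice_from_natCast]
      simp [List.drop_append]
    rw [this]
  · rw [tail_pvSplit_no_space _ h]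
    have hfind : PySem.Chars.find city.toList [' '] = -1 := by
      show PySem.Chars.find.go [' '] city.toList 0 = -1
      exact find_go_no_space _ h 0
    rw [hfind]
    simp
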